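-- pv_equiv track=rewrite | github.com/Crayonz10/zz05-waste-concrete-recycling | paper-pipeline-main/skills/lit-pool/pool_prepare.py | resolve_key_conflicts
-- ===== SOURCE A (Python) =====
-- from collections import defaultdict
--
-- def resolve_key_conflicts(keys: dict[str, str]) -> dict[str, str]:
--     """处理 citation key 冲突：同 key 追加 b/c/d... 后缀。
--     输入：{dedup_key: citation_key}
--     输出：{dedup_key: resolved_citation_key}
--     """
--     # 统计每个 citation key 出现次数
--     key_groups: dict[str, list[str]] = defaultdict(list)
--     for dk, ck in keys.items():
--         key_groups[ck].append(dk)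
--
--     resolved = {}
--     for ck, dks in key_groups.items():
--         if len(dks) == 1:
--             resolved[dks[0]] = ck
--         else:
--             # 按 dedup_key 排序保证稳定
--             for i, dk in enumerate(sorted(dks)):
--                 if i == 0:
--                     resolved[dk] = ck
--                 else:
--                     suffix = chr(ord('b') + i - 1)  # b, c, d, ...
--                     resolved[dk] = f"{ck}{suffix}"
--
--     return resolved
-- ===== SOURCE B (Python) =====
-- def resolve_key_conflicts(keys: dict[str, str]) -> dict[str, str]:
--     """Single sorted pass: order items by (first occurrence of citation key, dedup key)
--     and emit suffixes with a running counter."""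
--     order = {ck: i for i, ck in enumerate(dict.fromkeys(keys.values()))}
--     resolved = {}
--     prev, cnt = None, 0
--     for dk, ck in sorted(keys.items(), key=lambda p: (order[p[1]], p[0])):
--         cnt = cnt + 1 if ck == prev else 0
--         resolved[dk] = ck if cnt == 0 else ck + chr(ord("b") + cnt - 1)
--         prev = ck
--     return resolved
-- ===== Notes on version B (the rewrite author's own statement) =====
-- stated objective: alternative
-- what changed: A groups items into a defaultdict keyed by citation key and then walks the groups, sorting each group separately; B does one global sort of all items by the composite key (first-occurrence index of the citation key, dedup key) and then a single linear scan with a running per-key counter emits the suffixes, collapsing A's two-phase group-then-sort structure into sort-then-scan.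
import Mathlib
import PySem

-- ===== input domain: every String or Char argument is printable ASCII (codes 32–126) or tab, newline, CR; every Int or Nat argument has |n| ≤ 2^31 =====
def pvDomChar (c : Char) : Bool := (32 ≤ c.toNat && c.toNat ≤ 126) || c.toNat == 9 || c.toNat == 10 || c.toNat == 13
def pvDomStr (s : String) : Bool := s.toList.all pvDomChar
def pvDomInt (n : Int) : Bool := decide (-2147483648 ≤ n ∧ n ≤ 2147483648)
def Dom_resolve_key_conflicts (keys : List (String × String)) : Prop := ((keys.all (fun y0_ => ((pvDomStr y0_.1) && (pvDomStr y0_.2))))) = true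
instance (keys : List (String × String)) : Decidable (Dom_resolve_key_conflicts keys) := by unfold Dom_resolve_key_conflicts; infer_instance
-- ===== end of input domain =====

-- B replaces A's group-into-a-defaultdict-then-walk-groups structure by one global sort on the
-- composite key (first occurrence of citation key, dedup key) followed by a single scan with a
-- running counter; equal output (including dict insertion order) is proved on Pre_ below.

-- ===== PORT A =====
def resolve_key_conflicts (keys : List (String × String)) : List (String × String) :=
  -- key_groups: dict[str, list[str]], defaultdict(list) filled by appending
  let key_groups := keys.foldl (fun d p => d.modify p.2 [] (fun l => l ++ [p.1])) PySem.Dict.empty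
  let resolved := key_groups.items.foldl (fun r g =>
      if g.2.length = 1 then
        -- dks[0]: the group is nonempty in this branch, so pyGetD is exact
        r.insert (PySem.List.pyGetD g.2 0 "") g.1
      else
        (PySem.List.enumerate (PySem.List.sorted g.2 (fun x => x)) 0).foldl
          (fun r q =>
            if q.1 = 0 then r.insert q.2 g.1
            else r.insert q.2 (g.1 ++ String.mk [Char.ofNat (98 + q.1 - 1).toNat]))
          r)
    PySem.Dict.empty
  resolved.items

-- ===== PORT B =====
def resolve_key_conflicts_alt (keys : List (String × String)) : List (String × String) :=
  -- order = {ck: i for i, ck in enumerate(dict.fromkeys(keys.values()))}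
  let order := (PySem.List.enumerate (PySem.List.dedup (keys.map (fun p => p.2))) 0).foldl
      (fun d q => d.insert q.2 q.1) (PySem.Dict.empty : PySem.Dict String Int)
  -- sorted(keys.items(), key=lambda p: (order[p[1]], p[0])); order[p[1]] never misses, getD is exact
  let items := PySem.List.sorted2 keys (fun p => order.getD p.2 0) (fun p => p.1)
  let st := items.foldl
      (fun (st : PySem.Dict String String × Option String × Int) p =>
        let cnt : Int := if (some p.2 == st.2.1) then st.2.2 + 1 else 0
        (st.1.insert p.1
            (if cnt = 0 then p.2 else p.2 ++ String.mk [Char.ofNat (98 + cnt - 1).toNat]),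
          some p.2, cnt))
      (PySem.Dict.empty, none, 0)
  st.1.items

-- ===== PRECONDITION & SPEC =====
-- Pre_: the dedup keys (dict keys of the Python input) are pairwise distinct — a Python dict
-- cannot hold duplicate keys, so this excludes only association lists that represent no dict.
def Pre_resolve_key_conflicts (keys : List (String × String)) : Prop :=
  (keys.map (fun p => p.1)).Nodup
instance (keys : List (String × String)) : Decidable (Pre_resolve_key_conflicts keys) := by
  unfold Pre_resolve_key_conflicts; infer_instance
def pvWitness_resolve_key_conflicts : (List (String × String)) :=
  [("d1", "k"), ("d2", "k"), ("d3", "m")]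
def Spec_resolve_key_conflicts (keys : List (String × String)) (out : List (String × String)) : Prop := out = resolve_key_conflicts_alt keys
instance (keys : List (String × String)) (out : List (String × String)) : Decidable (Spec_resolve_key_conflicts keys out) := by unfold Spec_resolve_key_conflicts; infer_instance

-- ===== CLAIM (what is proved, stated in full; the proofs are below) =====
def Claim_equal_resolve_key_conflicts : Prop := ∀ (keys : List (String × String)), Dom_resolve_key_conflicts keys → Pre_resolve_key_conflicts keys → Spec_resolve_key_conflicts keys (resolve_key_conflicts keys)

-- ===== LEMMAS AND PROOFS =====

-- the citation keys in first-occurrence order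
def pvCks (keys : List (String × String)) : List String :=
  PySem.List.dedup (keys.map (fun p => p.2))

-- the group of dedup keys sharing citation key ck, in input order
def pvGrp (keys : List (String × String)) (ck : String) : List String :=
  (keys.filter (fun p => p.2 == ck)).map (fun p => p.1)

-- the resolved citation key of position i within a group
def pvSfx (ck : String) (i : Int) : String :=
  if i = 0 then ck else ck ++ String.mk [Char.ofNat (98 + i - 1).toNat]

-- the labelled output block of one (already sorted) group
def pvLab (ck : String) (s : List String) : List (String × String) :=
  (PySem.List.enumerate s 0).map (fun q => (q.2, pvSfx ck q.1))

-- the common normal form of both outputs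
def pvE (keys : List (String × String)) : List (String × String) :=
  (pvCks keys).flatMap (fun ck => pvLab ck (PySem.List.sorted (pvGrp keys ck) (fun x => x)))

theorem pvGrp_ne_nil (keys : List (String × String)) (ck : String)
    (h : ck ∈ pvCks keys) : pvGrp keys ck ≠ [] := by
  unfold pvCks at h
  rw [PySem.List.mem_dedup] at h
  obtain ⟨p, hp, hp2⟩ := List.mem_map.mp h
  intro hnil
  have : p.1 ∈ pvGrp keys ck := by
    unfold pvGrp
    exact List.mem_map.mpr ⟨p, List.mem_filter.mpr ⟨hp, by simp [hp2]⟩, rfl⟩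
  rw [hnil] at this; exact absurd this (List.not_mem_nil)

-- counting a pair in the concatenation of the per-citation-key filters
theorem pvCount_flatMap (keys : List (String × String)) (cks : List String)
    (hnd : cks.Nodup) (p : String × String) :
    (cks.flatMap (fun c => keys.filter (fun q => q.2 == c))).count p
      = if p.2 ∈ cks then keys.count p else 0 := by
  induction cks with
  | nil => simp
  | cons c t ih =>
    rw [List.nodup_cons] at hnd
    rw [List.flatMap_cons, List.count_append, ih hnd.2]
    by_cases hc : p.2 = c
    · subst hc
      rw [List.count_filter (by simp)]
      simp [hnd.1]
    · have h0 : p ∉ keys.filter (fun q => q.2 == c) := by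
        intro hm; exact hc (by simpa using (List.mem_filter.mp hm).2)
      rw [List.count_eq_zero_of_not_mem h0]
      simp [List.mem_cons, hc]

-- the filters over the distinct citation keys partition the input
theorem pvPartition (keys : List (String × String)) :
    ((pvCks keys).flatMap (fun c => keys.filter (fun q => q.2 == c))).Perm keys := by
  rw [List.perm_iff_count]
  intro p
  rw [pvCount_flatMap keys _ (by unfold pvCks; exact PySem.List.nodup_dedup _) p]
  by_cases hm : p.2 ∈ pvCks keys
  · simp [hm]
  · have : p ∉ keys := fun hp =>
      hm (by unfold pvCks; rw [PySem.List.mem_dedup]; exact List.mem_map.mpr ⟨p, hp, rfl⟩)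
    simp [hm, List.count_eq_zero_of_not_mem this]

-- the per-group map (dk ↦ (dk, ck)) reproduces the filtered items
theorem pvGrp_map_pair (keys : List (String × String)) (ck : String) :
    (pvGrp keys ck).map (fun dk => (dk, ck)) = keys.filter (fun q => q.2 == ck) := by
  unfold pvGrp
  rw [List.map_map]
  have : ∀ q ∈ keys.filter (fun q => q.2 == ck),
      ((fun dk => (dk, ck)) ∘ fun p => p.1) q = id q := by
    intro q hq
    have := (List.mem_filter.mp hq).2
    simp only [Function.comp, id]
    simp only [beq_iff_eq] at this
    rw [← this]
  rw [List.map_congr_left this, List.map_id]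

-- the dedup keys emitted by pvE, as a flat list
theorem pvE_map_fst (keys : List (String × String)) :
    (pvE keys).map (fun q => q.1)
      = (pvCks keys).flatMap (fun ck => PySem.List.sorted (pvGrp keys ck) (fun x => x)) := by
  unfold pvE
  unfold pvLab
  rw [List.map_flatMap]
  congr 1
  funext ck
  rw [List.map_map]
  have : ((fun q : String × String => q.1) ∘ fun q : Int × String => (q.2, pvSfx ck q.1))
      = fun q : Int × String => q.2 := rfl
  rw [this, PySem.List.map_snd_enumerate]

theorem pvE_perm_fst (keys : List (String × String)) :
    ((pvE keys).map (fun q => q.1)).Perm (keys.map (fun q => q.1)) := by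
  rw [pvE_map_fst]
  have h1 : ((pvCks keys).flatMap (fun ck => PySem.List.sorted (pvGrp keys ck) (fun x => x))).Perm
      ((pvCks keys).flatMap (fun ck => pvGrp keys ck)) :=
    List.Perm.flatMap (List.Perm.refl _) (fun ck _ => PySem.List.sorted_perm _ _ _)
  have h2 : (pvCks keys).flatMap (fun ck => pvGrp keys ck)
      = ((pvCks keys).flatMap (fun c => keys.filter (fun q => q.2 == c))).map (fun q => q.1) := by
    rw [List.map_flatMap]
    simp only [pvGrp]
  refine h1.trans ?_
  rw [h2]
  exact (pvPartition keys).map _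

theorem pvE_fst_nodup (keys : List (String × String))
    (h : Pre_resolve_key_conflicts keys) : ((pvE keys).map (fun q => q.1)).Nodup :=
  ((pvE_perm_fst keys).symm.nodup) h

-- inserting the pvE pairs into an empty dict yields exactly pvE as items
theorem pvIns_items (keys : List (String × String)) (h : Pre_resolve_key_conflicts keys) :
    ((pvE keys).foldl (fun r (q : String × String) => r.insert q.1 q.2) PySem.Dict.empty).items
      = pvE keys := by
  have := PySem.Dict.items_foldl_insert_fresh (pvE keys) (fun q => q.1) (fun q => q.2)
    PySem.Dict.empty (fun a _ => PySem.Dict.contains_empty _) (pvE_fst_nodup keys h)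
  simpa using this

-- the group dictionary built by A
theorem pvKg_keys (keys : List (String × String)) :
    (keys.foldl (fun d p => d.modify p.2 [] (fun l => l ++ [p.1]))
        (PySem.Dict.empty : PySem.Dict String (List String))).keys = pvCks keys := by
  have := PySem.Dict.keys_foldl_modify_key keys (fun p => p.2) ([] : List String)
    (fun _ p l => l ++ [p.1]) PySem.Dict.empty
  simpa [PySem.Dict.keys_empty, PySem.Set.update_nil_left, pvCks,
    PySem.List.dedup_eq_ofList] using this

theorem pvKg_nodup (keys : List (String × String)) :
    (keys.foldl (fun d p => d.modify p.2 [] (fun l => l ++ [p.1]))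
        (PySem.Dict.empty : PySem.Dict String (List String))).keys.Nodup :=
  PySem.Dict.nodup_keys_foldl_modify_key keys (fun p => p.2) ([] : List String)
    (fun _ p l => l ++ [p.1]) PySem.Dict.empty (by simp [PySem.Dict.keys_empty])

theorem pvKg_getD (keys : List (String × String)) (ck : String) :
    (keys.foldl (fun d p => d.modify p.2 [] (fun l => l ++ [p.1]))
        (PySem.Dict.empty : PySem.Dict String (List String))).getD ck [] = pvGrp keys ck := by
  have hswap : keys.foldl (fun d p => d.modify p.2 [] (fun l => l ++ [p.1]))
      (PySem.Dict.empty : PySem.Dict String (List String))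
      = (keys.map (fun p => (p.2, p.1))).foldl
          (fun d q => d.modify q.1 [] (fun l => l ++ [q.2])) PySem.Dict.empty := by
    rw [List.foldl_map]
  rw [hswap, PySem.Dict.getD_foldl_modify_append]
  rw [List.filter_map, List.map_map]
  simp only [PySem.Dict.getD_empty, List.nil_append]
  rfl

theorem pvKg_items (keys : List (String × String)) :
    (keys.foldl (fun d p => d.modify p.2 [] (fun l => l ++ [p.1]))
        (PySem.Dict.empty : PySem.Dict String (List String))).items
      = (pvCks keys).map (fun ck => (ck, pvGrp keys ck)) := by
  rw [PySem.Dict.items_eq_map_keys _ (pvKg_nodup keys) [], pvKg_keys]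
  exact List.map_congr_left (fun ck _ => by rw [pvKg_getD keys ck])

theorem resolve_key_conflicts_A_eq (keys : List (String × String))
    (h : Pre_resolve_key_conflicts keys) : resolve_key_conflicts keys = pvE keys := by
  unfold resolve_key_conflicts
  dsimp only
  rw [pvKg_items]
  have hbody : ∀ (r : PySem.Dict String String), ∀ g ∈ (pvCks keys).map (fun ck => (ck, pvGrp keys ck)),
      (if g.2.length = 1 then r.insert (PySem.List.pyGetD g.2 0 "") g.1
       else (PySem.List.enumerate (PySem.List.sorted g.2 (fun x => x)) 0).foldl
          (fun r q => if q.1 = 0 then r.insert q.2 g.1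
            else r.insert q.2 (g.1 ++ String.mk [Char.ofNat (98 + q.1 - 1).toNat])) r)
      = (pvLab g.1 (PySem.List.sorted g.2 (fun x => x))).foldl
          (fun r (q : String × String) => r.insert q.1 q.2) r := by
    intro r g hg
    obtain ⟨ck, hck, rfl⟩ := List.mem_map.mp hg
    by_cases h1 : (pvGrp keys ck).length = 1
    · obtain ⟨d, hd⟩ := List.length_eq_one_iff.mp h1
      simp only [hd]
      have hs : PySem.List.sorted [d] (fun x : String => x) = [d] := rfl
      simp [hs, pvLab, PySem.List.enumerate_cons, PySem.List.enumerate_nil, pvSfx,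
        PySem.List.pyGetD]
    · rw [if_neg h1]
      unfold pvLab
      rw [List.foldl_map]
      apply PySem.List.foldl_congr_mem
      intro acc q _
      unfold pvSfx
      by_cases h0 : q.1 = 0 <;> simp [h0]
  rw [PySem.List.foldl_congr_mem _ _ _ _ hbody, List.foldl_map, ← List.foldl_flatMap]
  exact pvIns_items keys h

-- sorted2 with two linearly ordered keys is sorted with the lexicographic key
theorem pvSorted2_eq_sorted {α κ₁ κ₂ : Type} [LinearOrder κ₁] [LinearOrder κ₂]
    (xs : List α) (k1 : α → κ₁) (k2 : α → κ₂) :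
    PySem.List.sorted2 xs k1 k2 = PySem.List.sorted xs (fun x => toLex (k1 x, k2 x)) := by
  unfold PySem.List.sorted2 PySem.List.sorted
  dsimp only
  have hbef : (fun a b => decide (k1 a < k1 b) || (!decide (k1 b < k1 a) && decide (k2 a < k2 b)))
      = fun a b => decide (toLex (k1 a, k2 a) < toLex (k1 b, k2 b)) := by
    funext a b
    rcases lt_trichotomy (k1 a) (k1 b) with hlt | heq | hgt
    · simp [Prod.Lex.lt_iff, hlt]
    · simp [Prod.Lex.lt_iff, heq]
    · simp [Prod.Lex.lt_iff, lt_asymm hgt, hgt, (ne_of_lt hgt).symm]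
  rw [hbef]
  simp

-- the first-occurrence-index dictionary built by B
def pvOrder (keys : List (String × String)) : PySem.Dict String Int :=
  (PySem.List.enumerate (PySem.List.dedup (keys.map (fun p => p.2))) 0).foldl
    (fun d q => d.insert q.2 q.1) PySem.Dict.empty

theorem pvOrder_items (keys : List (String × String)) :
    (pvOrder keys).items = (PySem.List.enumerate (pvCks keys) 0).map (fun q => (q.2, q.1)) := by
  have := PySem.Dict.items_foldl_insert_fresh (PySem.List.enumerate (pvCks keys) 0)
    (fun q => q.2) (fun q => q.1) PySem.Dict.empty
    (fun a _ => PySem.Dict.contains_empty _)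
    (by rw [PySem.List.map_snd_enumerate]; exact PySem.List.nodup_dedup _)
  simpa [pvOrder, pvCks] using this

theorem pvOrder_keys_nodup (keys : List (String × String)) : (pvOrder keys).keys.Nodup := by
  have : (pvOrder keys).keys = pvCks keys := by
    show (pvOrder keys).items.map (fun p => p.1) = pvCks keys
    rw [pvOrder_items, List.map_map]
    exact PySem.List.map_snd_enumerate _ _
  rw [this]; exact PySem.List.nodup_dedup _

theorem pvPos (keys : List (String × String)) (i : Nat) (hi : i < (pvCks keys).length) :
    (pvOrder keys).getD (pvCks keys)[i] 0 = i := by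
  apply PySem.Dict.getD_of_mem_items _ _ (pvOrder_keys_nodup keys)
  rw [pvOrder_items]
  exact List.mem_map.mpr ⟨((i : Int), (pvCks keys)[i]),
    (PySem.List.mem_enumerate_iff _ _ _).mpr ⟨i, hi, by simp⟩, rfl⟩

-- the sorted key of B
def pvKey (keys : List (String × String)) (p : String × String) : Lex (Int × String) :=
  toLex ((pvOrder keys).getD p.2 0, p.1)

-- the globally sorted item list of B
def pvS (keys : List (String × String)) : List (String × String) :=
  (pvCks keys).flatMap (fun ck =>
    (PySem.List.sorted (pvGrp keys ck) (fun x => x)).map (fun dk => (dk, ck)))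

theorem pvS_perm (keys : List (String × String)) : (pvS keys).Perm keys := by
  have hblock : ∀ ck ∈ pvCks keys,
      ((PySem.List.sorted (pvGrp keys ck) (fun x => x)).map (fun dk => (dk, ck))).Perm
        (keys.filter (fun q => q.2 == ck)) := by
    intro ck _
    rw [← pvGrp_map_pair]
    exact (PySem.List.sorted_perm _ _ _).map _
  exact (List.Perm.flatMap (List.Perm.refl _) hblock).trans (pvPartition keys)

theorem pvGrp_nodup (keys : List (String × String)) (h : Pre_resolve_key_conflicts keys)
    (ck : String) : (pvGrp keys ck).Nodup := by
  unfold pvGrp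
  have hsub : ((keys.filter (fun p => p.2 == ck)).map (fun p => p.1)).Sublist
      (keys.map (fun p => p.1)) := List.Sublist.map _ List.filter_sublist
  exact hsub.nodup h

theorem pvS_pairwise (keys : List (String × String)) (h : Pre_resolve_key_conflicts keys) :
    (pvS keys).Pairwise (fun p q => pvKey keys p < pvKey keys q) := by
  unfold pvS
  rw [List.flatMap_def]
  rw [List.pairwise_flatten]
  constructor
  · intro l' hl'
    obtain ⟨ck, _, rfl⟩ := List.mem_map.mp hl'
    rw [List.pairwise_map]
    have hle := PySem.List.sorted_pairwise (pvGrp keys ck) (fun x : String => x)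
    have hnd : (PySem.List.sorted (pvGrp keys ck) (fun x : String => x)).Nodup :=
      (PySem.List.sorted_perm _ _ _).symm.nodup (pvGrp_nodup keys h ck)
    refine (hle.and hnd).imp ?_
    intro a b hab
    unfold pvKey
    rw [Prod.Lex.lt_iff]
    exact Or.inr ⟨rfl, lt_of_le_of_ne hab.1 hab.2⟩
  · rw [List.pairwise_map, List.pairwise_iff_getElem]
    intro i j hi hj hij x hx y hy
    obtain ⟨dx, _, rfl⟩ := List.mem_map.mp hx
    obtain ⟨dy, _, rfl⟩ := List.mem_map.mp hy
    unfold pvKey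
    rw [Prod.Lex.lt_iff]
    left
    simp only [ofLex_toLex]
    rw [pvPos keys i hi, pvPos keys j hj]
    exact_mod_cast hij

theorem pvSorted2_keys (keys : List (String × String)) (h : Pre_resolve_key_conflicts keys) :
    PySem.List.sorted2 keys (fun p => (pvOrder keys).getD p.2 0) (fun p => p.1) = pvS keys := by
  rw [pvSorted2_eq_sorted]
  exact PySem.List.sorted_eq_of_perm_of_pairwise_lt _ _ _ (pvS_perm keys) (pvS_pairwise keys h)

-- one step of B's scan
def pvStep (st : PySem.Dict String String × Option String × Int) (p : String × String) :
    PySem.Dict String String × Option String × Int :=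
  let cnt : Int := if (some p.2 == st.2.1) then st.2.2 + 1 else 0
  (st.1.insert p.1
      (if cnt = 0 then p.2 else p.2 ++ String.mk [Char.ofNat (98 + cnt - 1).toNat]),
    some p.2, cnt)

-- scanning the rest of a block: the counter keeps running
theorem pvSeg (ck : String) (s : List String) : ∀ (r : PySem.Dict String String) (j : Int),
    0 ≤ j →
    (s.map (fun dk => (dk, ck))).foldl pvStep (r, some ck, j)
      = ((PySem.List.enumerate s (j + 1)).foldl
            (fun r (q : Int × String) => r.insert q.2 (pvSfx ck q.1)) r,
          some ck, j + s.length) := by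
  induction s with
  | nil => intro r j hj; simp [PySem.List.enumerate_nil]
  | cons x t ih =>
    intro r j hj
    rw [List.map_cons, List.foldl_cons, PySem.List.enumerate_cons, List.foldl_cons]
    have hstep : pvStep (r, some ck, j) (x, ck)
        = (r.insert x (pvSfx ck (j + 1)), some ck, j + 1) := by
      unfold pvStep pvSfx
      simp only [beq_self_eq_true, if_true]
    rw [hstep, ih _ (j + 1) (by omega)]
    simp only [Prod.mk.injEq]
    exact ⟨trivial, trivial, by push_cast [List.length_cons]; ring⟩

-- scanning one whole block: the counter resets and the block is emitted
theorem pvBlockScan (ck : String) (s : List String) (r : PySem.Dict String String)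
    (prev : Option String) (cnt : Int) (hs : s ≠ []) (hprev : prev ≠ some ck) :
    (s.map (fun dk => (dk, ck))).foldl pvStep (r, prev, cnt)
      = ((pvLab ck s).foldl (fun r (q : String × String) => r.insert q.1 q.2) r,
          some ck, (s.length : Int) - 1) := by
  cases s with
  | nil => exact absurd rfl hs
  | cons x t =>
    rw [List.map_cons, List.foldl_cons]
    have hstep : pvStep (r, prev, cnt) (x, ck) = (r.insert x (pvSfx ck 0), some ck, 0) := by
      unfold pvStep pvSfx
      have hne : (some ck == prev) = false := by
        simp only [beq_eq_false_iff_ne]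
        exact fun e => hprev e.symm
      simp [hne]
    rw [hstep, pvSeg ck t _ 0 le_rfl]
    unfold pvLab
    rw [PySem.List.enumerate_cons, List.map_cons, List.foldl_cons, List.foldl_map]
    simp only [Prod.mk.injEq]
    exact ⟨trivial, trivial, by push_cast [List.length_cons]; ring⟩

-- scanning a list of nonempty blocks with pairwise distinct citation keys
theorem pvOuter (bs : List (String × List String)) :
    ∀ (r : PySem.Dict String String) (prev : Option String) (cnt : Int),
    (∀ b ∈ bs, b.2 ≠ []) → bs.Pairwise (fun a b => a.1 ≠ b.1) →
    (∀ b ∈ bs, prev ≠ some b.1) →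
    ∃ prev' cnt',
      (bs.flatMap (fun b => b.2.map (fun dk => (dk, b.1)))).foldl pvStep (r, prev, cnt)
        = ((bs.flatMap (fun b => pvLab b.1 b.2)).foldl
              (fun r (q : String × String) => r.insert q.1 q.2) r, prev', cnt')
      ∧ (prev' = prev ∨ ∃ b ∈ bs, prev' = some b.1) := by
  induction bs with
  | nil => intro r prev cnt _ _ _; exact ⟨prev, cnt, by simp, Or.inl rfl⟩
  | cons b t ih =>
    intro r prev cnt hne hpw hprev
    rw [List.flatMap_cons, List.foldl_append, List.flatMap_cons, List.foldl_append]
    rw [pvBlockScan b.1 b.2 r prev cnt (hne b List.mem_cons_self) (hprev b List.mem_cons_self)]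
    obtain ⟨p', c', heq, hp⟩ := ih _ (some b.1) ((b.2.length : Int) - 1)
      (fun b' hb' => hne b' (List.mem_cons_of_mem _ hb'))
      ((List.pairwise_cons.mp hpw).2)
      (fun b' hb' e => (List.pairwise_cons.mp hpw).1 b' hb' (Option.some.inj e))
    refine ⟨p', c', heq, ?_⟩
    rcases hp with e | ⟨b', hb', e⟩
    · exact Or.inr ⟨b, List.mem_cons_self, e⟩
    · exact Or.inr ⟨b', List.mem_cons_of_mem _ hb', e⟩

theorem resolve_key_conflicts_B_eq (keys : List (String × String))
    (h : Pre_resolve_key_conflicts keys) : resolve_key_conflicts_alt keys = pvE keys := by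
  show ((PySem.List.sorted2 keys (fun p => (pvOrder keys).getD p.2 0) (fun p => p.1)).foldl
      pvStep (PySem.Dict.empty, none, 0)).1.items = pvE keys
  rw [pvSorted2_keys keys h]
  have hbs1 : pvS keys
      = ((pvCks keys).map (fun ck => (ck, PySem.List.sorted (pvGrp keys ck) (fun x => x)))).flatMap
          (fun b => b.2.map (fun dk => (dk, b.1))) := by
    rw [List.flatMap_map]; rfl
  have hbs2 : pvE keys
      = ((pvCks keys).map (fun ck => (ck, PySem.List.sorted (pvGrp keys ck) (fun x => x)))).flatMap
          (fun b => pvLab b.1 b.2) := by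
    rw [List.flatMap_map]; rfl
  obtain ⟨p', c', heq, _⟩ := pvOuter
    ((pvCks keys).map (fun ck => (ck, PySem.List.sorted (pvGrp keys ck) (fun x => x))))
    PySem.Dict.empty none 0
    (by
      intro b hb
      obtain ⟨ck, hck, rfl⟩ := List.mem_map.mp hb
      simpa [PySem.List.sorted_eq_nil_iff] using pvGrp_ne_nil keys ck hck)
    (by
      rw [List.pairwise_map]
      exact (PySem.List.nodup_dedup _).imp (fun hab => hab))
    (fun b _ => by simp)
  rw [hbs1, heq]
  show ((((pvCks keys).map (fun ck => (ck, PySem.List.sorted (pvGrp keys ck) (fun x => x)))).flatMap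
      (fun b => pvLab b.1 b.2)).foldl
        (fun r (q : String × String) => r.insert q.1 q.2) PySem.Dict.empty).items = pvE keys
  rw [← hbs2]
  exact pvIns_items keys h

-- ===== VERDICT (by name: the statement is the Claim_ definition above) =====
theorem resolve_key_conflicts_spec : Claim_equal_resolve_key_conflicts := by
  intro keys _ hpre
  unfold Spec_resolve_key_conflicts
  rw [resolve_key_conflicts_A_eq keys hpre, resolve_key_conflicts_B_eq keys hpre]
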